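-- pv_equiv track=rewrite | github.com/Emilio942/md | proteinMD/analysis/sasa.py | _is_hydrophobic_atom
-- ===== SOURCE A (Python) =====
-- HYDROPHOBIC_ATOMS = {'C', 'CA', 'CB', 'CG', 'CD', 'CE', 'CZ', 'S', 'SG', 'SD'}
--
-- HYDROPHILIC_ATOMS = {'N', 'O', 'ND1', 'ND2', 'NE1', 'NE2', 'NZ', 'OG', 'OD1', 'OD2', 'OE1', 'OE2'}
--
-- def _is_hydrophobic_atom(atom_type: str) -> bool:
--     """Determine if atom is hydrophobic."""
--     clean_type = ''.join(c for c in atom_type if c.isalpha()).upper()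
--
--     if clean_type in HYDROPHOBIC_ATOMS:
--         return True
--     elif clean_type in HYDROPHILIC_ATOMS:
--         return False
--     else:
--         # Default classification based on element
--         element = clean_type[0] if clean_type else 'C'
--         return element in {'C', 'S'}
-- ===== SOURCE B (Python) =====
-- def _is_hydrophobic_atom(atom_type: str) -> bool:
--     """Determine if atom is hydrophobic."""
--     clean_type = ''.join(c for c in atom_type if c.isalpha()).upper()
--     # Every table entry classifies by its element letter: C/S hydrophobic, N/O not.
--     return (clean_type[0] if clean_type else 'C') in {'C', 'S'}
-- ===== Notes on version B (the rewrite author's own statement) =====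
-- stated objective: simpler
-- what changed: B drops both lookup tables and classifies by the first letter of the cleaned atom type alone (C/S hydrophobic, empty defaults to 'C'), which coincides with A's table cascade because every table entry is classified by its element letter.
import Mathlib
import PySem

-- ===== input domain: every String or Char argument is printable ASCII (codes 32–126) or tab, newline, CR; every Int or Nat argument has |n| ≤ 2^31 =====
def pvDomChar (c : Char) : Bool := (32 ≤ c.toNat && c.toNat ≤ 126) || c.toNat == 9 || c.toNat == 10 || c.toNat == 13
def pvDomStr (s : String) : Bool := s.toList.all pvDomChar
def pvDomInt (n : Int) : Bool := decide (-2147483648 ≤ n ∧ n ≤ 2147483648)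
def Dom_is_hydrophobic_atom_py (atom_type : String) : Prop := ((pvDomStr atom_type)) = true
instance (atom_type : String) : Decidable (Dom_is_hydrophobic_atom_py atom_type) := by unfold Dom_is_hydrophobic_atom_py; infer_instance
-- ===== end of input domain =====

-- B drops A's two lookup tables and classifies by the first letter of the cleaned name alone
-- (C/S hydrophobic, empty defaults to 'C'); objective: simpler.

-- ===== PORT A =====
-- the module constants HYDROPHOBIC_ATOMS / HYDROPHILIC_ATOMS (sets used only for membership)
def pvHydrophobicAtoms : List (List Char) :=
  [['C'], ['C','A'], ['C','B'], ['C','G'], ['C','D'], ['C','E'], ['C','Z'], ['S'], ['S','G'], ['S','D']]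
def pvHydrophilicAtoms : List (List Char) :=
  [['N'], ['O'], ['N','D','1'], ['N','D','2'], ['N','E','1'], ['N','E','2'], ['N','Z'],
   ['O','G'], ['O','D','1'], ['O','D','2'], ['O','E','1'], ['O','E','2']]

def is_hydrophobic_atom_py (atom_type : String) : Bool :=
  let clean := PySem.Chars.upper (atom_type.toList.filter PySem.Chars.isalpha)
  if clean ∈ pvHydrophobicAtoms then
    true
  else if clean ∈ pvHydrophilicAtoms then
    false
  else
    let element := match clean with | [] => 'C' | c :: _ => c
    decide (element ∈ (['C', 'S'] : List Char))

-- ===== PORT B =====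
def is_hydrophobic_atom_py_alt (atom_type : String) : Bool :=
  let clean := PySem.Chars.upper (atom_type.toList.filter PySem.Chars.isalpha)
  decide ((match clean with | [] => 'C' | c :: _ => c) ∈ (['C', 'S'] : List Char))

-- ===== PRECONDITION & SPEC =====
def Spec_is_hydrophobic_atom_py (atom_type : String) (out : Bool) : Prop := out = is_hydrophobic_atom_py_alt atom_type
instance (atom_type : String) (out : Bool) : Decidable (Spec_is_hydrophobic_atom_py atom_type out) := by unfold Spec_is_hydrophobic_atom_py; infer_instance

-- ===== CLAIM (what is proved, stated in full; the proofs are below) =====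
def Claim_equal_is_hydrophobic_atom_py : Prop := ∀ (atom_type : String), Dom_is_hydrophobic_atom_py atom_type → Spec_is_hydrophobic_atom_py atom_type (is_hydrophobic_atom_py atom_type)

-- ===== LEMMAS AND PROOFS =====
-- Core fact: for ANY cleaned name, A's table cascade equals the first-letter rule,
-- because every hydrophobic table entry starts with 'C'/'S' and every hydrophilic one with 'N'/'O'.
theorem pv_core (clean : List Char) :
    (if clean ∈ pvHydrophobicAtoms then true
     else if clean ∈ pvHydrophilicAtoms then false
     else decide ((match clean with | [] => 'C' | c :: _ => c) ∈ (['C', 'S'] : List Char)))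
    = decide ((match clean with | [] => 'C' | c :: _ => c) ∈ (['C', 'S'] : List Char)) := by
  by_cases h1 : clean ∈ pvHydrophobicAtoms
  · simp only [h1, if_true]
    simp only [pvHydrophobicAtoms, List.mem_cons, List.not_mem_nil, or_false] at h1
    rcases h1 with h | h | h | h | h | h | h | h | h | h <;> subst h <;> decide
  · by_cases h2 : clean ∈ pvHydrophilicAtoms
    · simp only [h1, if_false, h2, if_true]
      simp only [pvHydrophilicAtoms, List.mem_cons, List.not_mem_nil, or_false] at h2
      rcases h2 with h | h | h | h | h | h | h | h | h | h | h | h <;> subst h <;> decide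
    · simp [h1, h2]

-- ===== VERDICT (by name: the statement is the Claim_ definition above) =====
theorem is_hydrophobic_atom_py_spec : Claim_equal_is_hydrophobic_atom_py := by
  intro atom_type _
  unfold Spec_is_hydrophobic_atom_py is_hydrophobic_atom_py is_hydrophobic_atom_py_alt
  exact pv_core _
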